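-- pv_equiv track=rewrite | github.com/Rafa-KozAnd/Cryptography | Code/crypto.py | criptoRot13
-- ===== SOURCE A (Python) =====
-- def criptoRot13(msg: str) -> str:
--
--     newMsg = ""
--
--     for char in msg:
--         if ord(char) < 78:
--             newMsg += chr(ord(char) + 13)
--         else:
--             newMsg += chr(ord(char) - 13)
--
--     return newMsg
-- ===== SOURCE B (Python) =====
-- def criptoRot13(msg: str) -> str:
--     n = len(msg)
--     if n == 0:
--         return ""
--     if n == 1:
--         o = ord(msg)
--         return chr(o + 13) if o < 78 else chr(o - 13)
--     mid = n // 2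
--     return criptoRot13(msg[:mid]) + criptoRot13(msg[mid:])
-- ===== Notes on version B (the rewrite author's own statement) =====
-- stated objective: alternative
-- what changed: Replaces A's linear accumulate-by-concatenation loop with a divide-and-conquer recursion: split the string at the midpoint, recurse on both halves, concatenate the results (single characters are the base case).
import Mathlib
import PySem

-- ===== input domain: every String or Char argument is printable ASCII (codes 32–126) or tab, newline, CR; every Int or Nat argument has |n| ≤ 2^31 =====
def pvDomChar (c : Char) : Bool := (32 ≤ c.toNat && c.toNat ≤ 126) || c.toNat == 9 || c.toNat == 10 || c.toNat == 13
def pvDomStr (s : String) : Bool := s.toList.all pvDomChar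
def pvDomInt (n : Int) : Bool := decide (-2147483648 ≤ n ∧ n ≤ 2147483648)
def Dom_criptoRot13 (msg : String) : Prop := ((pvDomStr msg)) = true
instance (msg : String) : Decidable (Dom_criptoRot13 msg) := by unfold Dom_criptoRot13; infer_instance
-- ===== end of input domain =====

-- B replaces A's linear accumulate-by-concatenation loop with a divide-and-conquer
-- recursion on string halves (objective: alternative).

-- ===== PORT A =====
-- A: loop over msg, appending chr(ord(c)+13) if ord(c) < 78 else chr(ord(c)-13).
-- ord/chr ported as Char.toNat / Char.ofNat (exact: every codepoint reached on Dom is a valid chr value).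
def criptoRot13 (msg : String) : String :=
  String.ofList (msg.toList.foldl (fun newMsg c =>
    newMsg ++ [if c.toNat < 78 then Char.ofNat (c.toNat + 13) else Char.ofNat (c.toNat - 13)]) [])

-- ===== PORT B =====
-- Source B's recursion on List Char: n==0 / n==1 base cases, otherwise split at mid = n // 2
-- (n ≥ 0 so Python's // equals Nat division) and recurse; msg[:mid] / msg[mid:] are
-- cs.take mid / cs.drop mid (PySem.List.slice_to_natCast / slice_from_natCast, exact here).
def pvRotRec (cs : List Char) : List Char :=
  if cs.length = 0 then []
  else if cs.length = 1 then
    match cs with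
    | c :: _ => [if c.toNat < 78 then Char.ofNat (c.toNat + 13) else Char.ofNat (c.toNat - 13)]
    | [] => []
  else
    let mid := cs.length / 2
    pvRotRec (cs.take mid) ++ pvRotRec (cs.drop mid)
termination_by cs.length
decreasing_by
  · simp only [List.length_take]; omega
  · simp only [List.length_drop]; omega

def criptoRot13_alt (msg : String) : String :=
  String.ofList (pvRotRec msg.toList)

-- ===== PRECONDITION & SPEC =====
def Spec_criptoRot13 (msg : String) (out : String) : Prop := out = criptoRot13_alt msg
instance (msg : String) (out : String) : Decidable (Spec_criptoRot13 msg out) := by unfold Spec_criptoRot13; infer_instance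

-- ===== CLAIM (what is proved, stated in full; the proofs are below) =====
def Claim_equal_criptoRot13 : Prop := ∀ (msg : String), Dom_criptoRot13 msg → Spec_criptoRot13 msg (criptoRot13 msg)

-- ===== LEMMAS AND PROOFS =====

def pvShift (c : Char) : Char :=
  if c.toNat < 78 then Char.ofNat (c.toNat + 13) else Char.ofNat (c.toNat - 13)

lemma pvRotRec_eq_map (cs : List Char) : pvRotRec cs = cs.map pvShift := by
  induction cs using pvRotRec.induct with
  | case1 cs h0 => simp [pvRotRec, List.length_eq_zero_iff.mp h0]
  | case2 c t h0 h1 =>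
    have ht : t = [] := by simpa using h1
    simp [pvRotRec, ht, pvShift]
  | case3 h0 h1 => simp at h1
  | case4 cs h0 h1 mid ih1 ih2 =>
    rw [pvRotRec.eq_def]
    simp only [if_neg h0, if_neg h1]
    rw [ih1, ih2, ← List.map_append, List.take_append_drop]

-- ===== VERDICT (by name: the statement is the Claim_ definition above) =====
theorem criptoRot13_spec : Claim_equal_criptoRot13 := by
  intro msg _
  unfold Spec_criptoRot13 criptoRot13 criptoRot13_alt
  rw [PySem.List.foldl_append_singleton_eq_map, pvRotRec_eq_map]
  rfl
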